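-- pv_equiv track=rewrite | github.com/TetianaHrunyk/DailyCodingProblems | challenge75.py | LeftSubSequence
-- ===== SOURCE A (Python) =====
-- def LeftSubSequence(s: list) -> int:
--     cur_sub = []
--     for j in range(len(s)):
--         if len(cur_sub) == 0:
--             cur_sub.append(s[j])
--         elif s[j] < cur_sub[-1]:
--             cur_sub.append(s[j])
--         else:
--             continue
--     return len(cur_sub)
-- ===== SOURCE B (Python) =====
-- def LeftSubSequence(s: list) -> int:
--     if not s:
--         return 0
--     m = []
--     for x in s:
--         m.append(x if not m else min(m[-1], x))
--     return 1 + sum(1 for a, b in zip(m, m[1:]) if b < a)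
-- ===== Notes on version B (the rewrite author's own statement) =====
-- stated objective: alternative
-- what changed: Replaces the greedy scan that appends kept elements to a list with a two-phase computation: build the prefix-minimum table, then count strict decreases between adjacent entries (plus one for the nonempty case).
import Mathlib
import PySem

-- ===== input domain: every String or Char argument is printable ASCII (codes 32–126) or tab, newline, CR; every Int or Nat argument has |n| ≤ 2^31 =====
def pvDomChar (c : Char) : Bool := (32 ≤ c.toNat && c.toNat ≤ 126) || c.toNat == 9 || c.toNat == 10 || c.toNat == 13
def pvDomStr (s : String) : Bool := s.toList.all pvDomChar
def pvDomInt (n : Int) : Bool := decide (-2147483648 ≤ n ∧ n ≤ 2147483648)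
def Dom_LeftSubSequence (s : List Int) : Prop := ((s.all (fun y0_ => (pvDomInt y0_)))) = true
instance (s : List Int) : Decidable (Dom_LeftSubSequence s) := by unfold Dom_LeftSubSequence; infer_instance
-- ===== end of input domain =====

-- B replaces A's greedy append-to-a-list scan by a prefix-minimum table plus a
-- separate count of strict decreases between adjacent table entries (objective: alternative).

-- ===== PORT A =====
-- A: single greedy pass over indices, appending s[j] to cur_sub when it strictly
-- decreases below the last kept element; result is cur_sub's length.
def LeftSubSequence (s : List Int) : Int :=
  let cur_sub :=
    (PySem.List.pyRange 0 s.length 1).foldl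
      (fun cur_sub j =>                            -- s[j] via pyGetD (index always in range here)
        if cur_sub.length = 0 then cur_sub ++ [PySem.List.pyGetD s j 0]
        else if PySem.List.pyGetD s j 0 < PySem.List.pyGetD cur_sub (-1) 0 then cur_sub ++ [PySem.List.pyGetD s j 0]
        else cur_sub)
      ([] : List Int)
  (cur_sub.length : Int)

-- ===== PORT B =====
-- B: build the prefix-minimum table m, then count adjacent strict decreases.
def LeftSubSequence_alt (s : List Int) : Int :=
  if s = [] then 0
  else
    let m := s.foldl
      (fun m x => m ++ [if m = [] then x else min (PySem.List.pyGetD m (-1) 0) x])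
      ([] : List Int)
    1 + (((m.zip (m.drop 1)).countP (fun p => p.2 < p.1) : Nat) : Int)

-- ===== PRECONDITION & SPEC =====
def Spec_LeftSubSequence (s : List Int) (out : Int) : Prop := out = LeftSubSequence_alt s
instance (s : List Int) (out : Int) : Decidable (Spec_LeftSubSequence s out) := by unfold Spec_LeftSubSequence; infer_instance

-- ===== CLAIM (what is proved, stated in full; the proofs are below) =====
def Claim_equal_LeftSubSequence : Prop := ∀ (s : List Int), Dom_LeftSubSequence s → Spec_LeftSubSequence s (LeftSubSequence s)

-- ===== LEMMAS AND PROOFS =====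

-- reference count: number of greedy strict decreases below the running value c
def pvGo (c : Int) : List Int → Nat
  | [] => 0
  | x :: t => if x < c then 1 + pvGo x t else pvGo c t

-- running-minimum tail starting from current minimum c
def pvMins (c : Int) : List Int → List Int
  | [] => []
  | x :: t => min c x :: pvMins (min c x) t

theorem pvA_step (t : List Int) : ∀ (L : List Int) (c : Int), L ≠ [] →
    PySem.List.pyGetD L (-1) 0 = c →
    (t.foldl
      (fun cur_sub x =>
        if cur_sub.length = 0 then cur_sub ++ [x]
        else if x < PySem.List.pyGetD cur_sub (-1) 0 then cur_sub ++ [x]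
        else cur_sub) L).length = L.length + pvGo c t := by
  induction t with
  | nil => intro L c _ _; simp [pvGo]
  | cons x t ih =>
    intro L c hL hlast
    simp only [List.foldl_cons, pvGo]
    have hlen : L.length ≠ 0 := by simpa using hL
    rw [if_neg hlen, hlast]
    by_cases hx : x < c
    · rw [if_pos hx]
      rw [ih (L ++ [x]) x (by simp) (PySem.List.pyGetD_neg_one_append_singleton L x 0)]
      simp [hx]; omega
    · rw [if_neg hx, ih L c hL hlast]
      simp [hx]

theorem pvB_step (t : List Int) : ∀ (L : List Int) (c : Int), L ≠ [] →
    PySem.List.pyGetD L (-1) 0 = c →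
    (t.foldl
      (fun m x => m ++ [if m = [] then x else min (PySem.List.pyGetD m (-1) 0) x]) L)
      = L ++ pvMins c t := by
  induction t with
  | nil => intro L c _ _; simp [pvMins]
  | cons x t ih =>
    intro L c hL hlast
    simp only [List.foldl_cons, pvMins]
    rw [if_neg hL, hlast]
    rw [ih (L ++ [min c x]) (min c x) (by simp)
        (PySem.List.pyGetD_neg_one_append_singleton L (min c x) 0)]
    simp

theorem pvCount_mins (t : List Int) : ∀ c : Int,
    ((c :: pvMins c t).zip (pvMins c t)).countP (fun p => p.2 < p.1) = pvGo c t := by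
  induction t with
  | nil => intro c; simp [pvMins, pvGo]
  | cons x t ih =>
    intro c
    simp only [pvMins, pvGo, List.zip_cons_cons, List.countP_cons]
    rw [ih (min c x)]
    by_cases hx : x < c
    · have : min c x = x := by omega
      simp [this, hx, Nat.add_comm]
    · have : min c x = c := by omega
      simp [this, hx]

-- ===== VERDICT (by name: the statement is the Claim_ definition above) =====
theorem LeftSubSequence_spec : Claim_equal_LeftSubSequence := by
  intro s _
  unfold Spec_LeftSubSequence LeftSubSequence LeftSubSequence_alt
  rw [PySem.List.foldl_pyRange_zero_pyGetD' s 0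
      (fun cur_sub x =>
        if cur_sub.length = 0 then cur_sub ++ [x]
        else if x < PySem.List.pyGetD cur_sub (-1) 0 then cur_sub ++ [x]
        else cur_sub) []]
  cases s with
  | nil => simp
  | cons h t =>
    rw [if_neg (by simp)]
    simp only [List.foldl_cons]
    rw [show (if ([] : List Int).length = 0 then ([] : List Int) ++ [h]
          else if h < PySem.List.pyGetD ([] : List Int) (-1) 0 then [] ++ [h] else []) = [h]
        by simp]
    rw [show ([] : List Int) ++ [if True then h
          else min (PySem.List.pyGetD ([] : List Int) (-1) 0) h] = [h] by simp]
    rw [pvA_step t [h] h (by simp) (by simp [PySem.List.pyGetD_neg_one])]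
    rw [pvB_step t [h] h (by simp) (by simp [PySem.List.pyGetD_neg_one])]
    have hzip : (([h] ++ pvMins h t).zip (([h] ++ pvMins h t).drop 1))
        = (h :: pvMins h t).zip (pvMins h t) := by
      cases hmt : pvMins h t with
      | nil => simp
      | cons a l => simp [List.zip]
    rw [hzip, pvCount_mins t h]
    simp [List.length_cons]
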